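-- pv_equiv track=rewrite | github.com/rahmanj1999/Final-Year-University-Cyber-Security-Project | Penetration testing.py | get_internalips
-- ===== SOURCE A (Python) =====
-- def get_internalips(output):
--
--     if "inet " in output.partition("netmask ")[-1]:
--         ip = get_internalips(output.partition("netmask ")[-1])
--     else:
--         ip = []
--
--     output = output.partition("netmask")[0]
--     output = (output.partition("inet ")[-1]).strip()
--     if not("127.0.0" in output):
--         ip.append(output)
--     return(ip)
--     mainloop()
-- ===== SOURCE B (Python) =====
-- def get_internalips(output):
--     ips = []
--     rest = output
--     while True:
--         cur = rest.partition("netmask")[0].partition("inet ")[-1].strip()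
--         if "127.0.0" not in cur:
--             ips.append(cur)
--         after = rest.partition("netmask ")[-1]
--         if "inet " in after:
--             rest = after
--         else:
--             break
--     return ips[::-1]
-- ===== Notes on version B (the rewrite author's own statement) =====
-- stated objective: alternative
-- what changed: A's self-recursion on the remaining tail of the output is replaced by an explicit while-loop with a list accumulator that appends each extracted address and reverses the collected list once at the end.
import Mathlib
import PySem

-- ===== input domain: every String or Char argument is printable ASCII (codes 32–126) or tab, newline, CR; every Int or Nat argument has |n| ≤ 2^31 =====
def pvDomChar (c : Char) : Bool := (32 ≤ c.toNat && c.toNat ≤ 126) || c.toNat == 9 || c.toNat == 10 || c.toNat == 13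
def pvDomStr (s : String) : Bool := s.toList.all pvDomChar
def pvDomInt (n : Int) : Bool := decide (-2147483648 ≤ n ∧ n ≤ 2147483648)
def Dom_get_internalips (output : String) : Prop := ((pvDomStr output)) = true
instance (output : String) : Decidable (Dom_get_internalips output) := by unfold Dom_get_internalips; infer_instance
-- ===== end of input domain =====

-- B replaces A's recursion by an explicit accumulator loop reversed at the end (objective: alternative, same cost).

-- s.partition(sep)[0]  (all uses here have sep nonempty)
def pvPartBefore (s sep : List Char) : List Char :=
  if PySem.Chars.find s sep = -1 then s else s.take (PySem.Chars.find s sep).toNat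

-- s.partition(sep)[-1]  (all uses here have sep nonempty)
def pvPartAfter (s sep : List Char) : List Char :=
  if PySem.Chars.find s sep = -1 then [] else s.drop ((PySem.Chars.find s sep).toNat + sep.length)

-- termination of both ports: if a nonempty sub occurs in partition(sep)[-1], that tail is strictly shorter
theorem pvPartAfter_lt (s sep sub : List Char) (hsub : sub ≠ []) (hsep : sep ≠ [])
    (h : PySem.Chars.isIn sub (pvPartAfter s sep) = true) :
    (pvPartAfter s sep).length < s.length := by
  unfold pvPartAfter at h ⊢
  split at h
  · exact absurd (List.infix_nil.mp ((PySem.Chars.isIn_iff_infix _ _).mp h)) hsub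
  · rename_i hf
    have hne : s.drop ((PySem.Chars.find s sep).toNat + sep.length) ≠ [] := by
      intro he; rw [he] at h
      exact hsub (List.infix_nil.mp ((PySem.Chars.isIn_iff_infix _ _).mp h))
    have hpos : 0 < (s.drop ((PySem.Chars.find s sep).toNat + sep.length)).length :=
      List.length_pos_iff.mpr hne
    have hlen : 0 < sep.length := List.length_pos_iff.mpr hsep
    rw [if_neg hf, List.length_drop]
    rw [List.length_drop] at hpos
    omega

-- ===== PORT A =====
def pvGetA (output : List Char) : List String :=
  let ip :=
    if h : PySem.Chars.isIn "inet ".toList (pvPartAfter output "netmask ".toList) = true then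
      pvGetA (pvPartAfter output "netmask ".toList)
    else []
  let o1 := pvPartBefore output "netmask".toList
  let o2 := PySem.Chars.strip (pvPartAfter o1 "inet ".toList)
  if PySem.Chars.isIn "127.0.0".toList o2 = false then ip ++ [String.ofList o2] else ip
termination_by output.length
decreasing_by exact pvPartAfter_lt _ _ _ (by decide) (by decide) h

def get_internalips (output : String) : List String := pvGetA output.toList

-- ===== PORT B =====
-- the while-True body of Source B; `break` = falling through to `ips'`
def pvLoopB (rest : List Char) (ips : List String) : List String :=
  let cur := PySem.Chars.strip
    (pvPartAfter (pvPartBefore rest "netmask".toList) "inet ".toList)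
  let ips' := if PySem.Chars.isIn "127.0.0".toList cur = false then ips ++ [String.ofList cur] else ips
  if h : PySem.Chars.isIn "inet ".toList (pvPartAfter rest "netmask ".toList) = true then
    pvLoopB (pvPartAfter rest "netmask ".toList) ips'
  else ips'
termination_by rest.length
decreasing_by exact pvPartAfter_lt _ _ _ (by decide) (by decide) h

def get_internalips_alt (output : String) : List String :=
  (pvLoopB output.toList []).reverse

-- ===== PRECONDITION & SPEC =====
def Spec_get_internalips (output : String) (out : List String) : Prop := out = get_internalips_alt output
instance (output : String) (out : List String) : Decidable (Spec_get_internalips output out) := by unfold Spec_get_internalips; infer_instance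

-- ===== CLAIM (what is proved, stated in full; the proofs are below) =====
def Claim_equal_get_internalips : Prop := ∀ (output : String), Dom_get_internalips output → Spec_get_internalips output (get_internalips output)

-- ===== LEMMAS AND PROOFS =====
-- loop invariant: the loop's result is the accumulator followed by A's result reversed
theorem pvLoopB_eq_aux (n : Nat) : ∀ (rest : List Char), rest.length = n → ∀ (acc : List String),
    pvLoopB rest acc = acc ++ (pvGetA rest).reverse := by
  induction n using Nat.strongRecOn with
  | _ n ih =>
    intro rest hn acc
    rw [pvLoopB.eq_def, pvGetA.eq_def]
    by_cases h : PySem.Chars.isIn "inet ".toList (pvPartAfter rest "netmask ".toList) = true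
    · have hlt := pvPartAfter_lt rest ("netmask ".toList) ("inet ".toList) (by decide) (by decide) h
      simp only [h, dite_true]
      rw [ih _ (by omega) _ rfl]
      split <;> simp [List.append_assoc]
    · rw [Bool.not_eq_true] at h
      simp only [h, Bool.false_eq_true, dite_false]
      split <;> simp

-- ===== VERDICT (by name: the statement is the Claim_ definition above) =====
theorem get_internalips_spec : Claim_equal_get_internalips := by
  intro output _
  unfold Spec_get_internalips get_internalips get_internalips_alt
  rw [pvLoopB_eq_aux _ _ rfl]
  simp
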